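-- pv_equiv track=rewrite | github.com/ryanshi42/Advent-of-Code-2021 | day15_2.py | dupRowRow
-- ===== SOURCE A (Python) =====
-- def dupRowRow(g):
--     toReturn = g
--     y = g
--     for _ in range(4):
--         newY = []
--         for l in y:
--             x = [elem % 9 + 1 for elem in l]
--             newY.append(x)
--         y = newY
--         toReturn += y
--
--     return toReturn
-- ===== SOURCE B (Python) =====
-- def dupRowRow(g):
--     base = list(g)
--     for k in range(1, 5):
--         g += [[(e % 9 + k - 1) % 9 + 1 for e in row] for row in base]
--     return g
-- ===== Notes on version B (the rewrite author's own statement) =====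
-- stated objective: alternative
-- what changed: B replaces A's cumulative chaining (each appended copy recomputed row-by-row from the previous copy via x%9+1) with four independent direct maps of the original rows using the closed-form k-fold shift (e%9+k-1)%9+1.
import Mathlib
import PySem

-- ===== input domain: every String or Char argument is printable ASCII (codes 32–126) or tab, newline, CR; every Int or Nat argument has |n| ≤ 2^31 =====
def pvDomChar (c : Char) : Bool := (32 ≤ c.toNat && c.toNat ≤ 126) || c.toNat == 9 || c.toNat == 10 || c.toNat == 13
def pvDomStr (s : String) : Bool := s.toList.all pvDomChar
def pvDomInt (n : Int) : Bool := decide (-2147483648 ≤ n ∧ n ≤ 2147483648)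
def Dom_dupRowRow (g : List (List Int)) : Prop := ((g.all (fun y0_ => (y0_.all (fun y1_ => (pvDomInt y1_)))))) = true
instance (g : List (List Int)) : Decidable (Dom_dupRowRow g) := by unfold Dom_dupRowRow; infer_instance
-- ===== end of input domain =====

-- B computes each of the four appended copies directly from the base grid with the
-- closed-form k-fold shift (e%9+k-1)%9+1 instead of A's copy-from-previous-copy chaining;
-- both mutate g in place and the equivalence proved here is about the return value.

-- ===== PORT A =====
def dupRowRow (g : List (List Int)) : List (List Int) :=
  -- state (toReturn, y); each of the 4 iterations maps x%9+1 over the previous y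
  ((List.range 4).foldl
    (fun st _ =>
      let newY := st.2.map (fun l => l.map (fun elem => PySem.Int.mod elem 9 + 1))
      (st.1 ++ newY, newY))
    (g, g)).1

-- ===== PORT B =====
def dupRowRow_alt (g : List (List Int)) : List (List Int) :=
  (PySem.List.pyRange 1 5 1).foldl
    (fun acc k =>
      acc ++ g.map (fun row => row.map (fun e => PySem.Int.mod (PySem.Int.mod e 9 + k - 1) 9 + 1)))
    g

-- ===== PRECONDITION & SPEC =====
def Spec_dupRowRow (g : List (List Int)) (out : List (List Int)) : Prop := out = dupRowRow_alt g
instance (g : List (List Int)) (out : List (List Int)) : Decidable (Spec_dupRowRow g out) := by unfold Spec_dupRowRow; infer_instance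

-- ===== CLAIM (what is proved, stated in full; the proofs are below) =====
def Claim_equal_dupRowRow : Prop := ∀ (g : List (List Int)), Dom_dupRowRow g → Spec_dupRowRow g (dupRowRow g)

-- ===== LEMMAS AND PROOFS =====

theorem pymod9 (a : Int) : PySem.Int.mod a 9 = a % 9 :=
  PySem.Int.mod_eq_emod_of_pos (by norm_num)

theorem grid_step (g : List (List Int)) (k k' : Int) (hk : k' = k + 1) :
    (g.map (fun row => row.map (fun e => (e % 9 + k - 1) % 9 + 1))).map
        (fun l => l.map (fun elem => elem % 9 + 1))
      = g.map (fun row => row.map (fun e => (e % 9 + k' - 1) % 9 + 1)) := by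
  subst hk
  rw [List.map_map]
  apply List.map_congr_left
  intro row _
  simp only [Function.comp, List.map_map]
  apply List.map_congr_left
  intro e _
  simp only [Function.comp]
  omega

theorem grid_one (g : List (List Int)) :
    g.map (fun l => l.map (fun elem => elem % 9 + 1))
      = g.map (fun row => row.map (fun e => (e % 9 + 1 - 1) % 9 + 1)) := by
  apply List.map_congr_left
  intro row _
  apply List.map_congr_left
  intro e _
  omega

-- ===== VERDICT (by name: the statement is the Claim_ definition above) =====
theorem dupRowRow_spec : Claim_equal_dupRowRow := by
  intro g _
  show dupRowRow g = dupRowRow_alt g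
  unfold dupRowRow dupRowRow_alt
  have hr : PySem.List.pyRange 1 5 1 = [1, 2, 3, 4] := by decide
  rw [hr]
  simp only [List.range, List.range.loop, List.foldl, pymod9]
  rw [grid_one g, grid_step g 1 2 (by norm_num), grid_step g 2 3 (by norm_num),
      grid_step g 3 4 (by norm_num)]
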